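-- pv_equiv track=rewrite | github.com/arphost-com/ARPVPN | arpvpn/__main__.py | _is_valid_redirect_host
-- ===== SOURCE A (Python) =====
-- import ipaddress
--
-- def _is_valid_redirect_host(hostname: str) -> bool:
--     candidate = (hostname or "").strip()
--     if not candidate:
--         return False
--     if candidate.lower() == "localhost":
--         return True
--     try:
--         ipaddress.IPv4Address(candidate)
--         return True
--     except ValueError:
--         pass
--     if "." not in candidate:
--         return False
--     allowed = set("abcdefghijklmnopqrstuvwxyzABCDEFGHIJKLMNOPQRSTUVWXYZ0123456789-.")
--     if any(ch not in allowed for ch in candidate):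
--         return False
--     return not candidate.startswith(".") and not candidate.endswith(".") and ".." not in candidate
-- ===== SOURCE B (Python) =====
-- def _is_valid_redirect_host(hostname: str) -> bool:
--     candidate = (hostname or "").strip()
--     if not candidate:
--         return False
--     if candidate.lower() == "localhost":
--         return True
--     labels = candidate.split(".")
--     return len(labels) >= 2 and all(
--         label != "" and all(ch.isalnum() or ch == "-" for ch in label)
--         for label in labels
--     )
-- ===== Notes on version B (the rewrite author's own statement) =====
-- stated objective: simpler
-- what changed: B replaces A's IPv4Address try/except plus four separate string scans (dot membership, allowed-set scan, startswith/endswith, double-dot search) by one split on the dot separator and a single pass over the resulting labels (at least two labels, each nonempty and alnum/hyphen), which subsumes every dotted-decimal IPv4 string A accepts.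
import Mathlib
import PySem

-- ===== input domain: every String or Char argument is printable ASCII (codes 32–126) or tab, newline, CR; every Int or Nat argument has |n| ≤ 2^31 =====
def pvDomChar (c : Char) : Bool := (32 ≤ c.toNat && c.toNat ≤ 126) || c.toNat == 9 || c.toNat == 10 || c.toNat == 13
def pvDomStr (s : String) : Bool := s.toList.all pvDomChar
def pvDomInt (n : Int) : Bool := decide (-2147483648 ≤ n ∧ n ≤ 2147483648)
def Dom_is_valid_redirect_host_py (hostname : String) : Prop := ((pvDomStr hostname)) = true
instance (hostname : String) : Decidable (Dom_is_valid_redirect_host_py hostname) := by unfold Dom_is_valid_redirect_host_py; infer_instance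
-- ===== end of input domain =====

-- B validates the host with one split('.') and a single pass over the labels instead of A's
-- IPv4 try/except plus four separate string scans (simpler; same return value everywhere).


-- ===== PORT A =====
-- membership in A's literal `allowed` set "a…zA…Z0…9-." written as the equivalent range test
def pvAllowedA (c : Char) : Bool :=
  (decide ('a' ≤ c) && decide (c ≤ 'z')) || (decide ('A' ≤ c) && decide (c ≤ 'Z')) ||
  (decide ('0' ≤ c) && decide (c ≤ '9')) || c == '-' || c == '.'

-- int(octet_str) for an all-digit octet (≤ 3 digits)
def pvDigitsVal (p : List Char) : Nat := p.foldl (fun a c => a * 10 + (c.toNat - 48)) 0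

-- hand port of ipaddress._BaseV4._parse_octet, exact on ASCII:
-- nonempty, decimal digits only, at most 3 chars, no leading zero unless "0", value ≤ 255
def pvParseOctet (p : List Char) : Bool :=
  !p.isEmpty && p.all PySem.Chars.isdigit && decide (p.length ≤ 3) &&
  !(decide (1 < p.length) && p.headI == '0') && decide (pvDigitsVal p ≤ 255)

-- hand port of ipaddress.IPv4Address validity (_ip_int_from_string): split on '.',
-- exactly 4 octets, each octet parses
def pvIsIPv4 (cs : List Char) : Bool :=
  let parts := cs.splitOn '.'
  parts.length == 4 && parts.all pvParseOctet

def is_valid_redirect_host_py (hostname : String) : Bool :=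
  let candidate := PySem.Chars.strip hostname.toList
  if candidate.isEmpty then false
  else if PySem.Chars.lower candidate == "localhost".toList then true
  else if pvIsIPv4 candidate then true
  else if !PySem.Chars.isIn ['.'] candidate then false
  else if candidate.any (fun ch => !pvAllowedA ch) then false
  else !PySem.Chars.startswith candidate ['.'] && !PySem.Chars.endswith candidate ['.'] &&
       !PySem.Chars.isIn ['.', '.'] candidate

-- ===== PORT B =====
-- label != "" and every char alnum or '-'
def pvLabelOk (l : List Char) : Bool :=
  !l.isEmpty && l.all (fun c => PySem.Chars.isalnum c || c == '-')

def is_valid_redirect_host_py_alt (hostname : String) : Bool :=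
  let candidate := PySem.Chars.strip hostname.toList
  if candidate.isEmpty then false
  else if PySem.Chars.lower candidate == "localhost".toList then true
  else
    let labels := candidate.splitOn '.'   -- candidate.split(".") : List.splitOn is Python split for a 1-char sep
    decide (2 ≤ labels.length) && labels.all pvLabelOk

-- ===== PRECONDITION & SPEC =====
def Spec_is_valid_redirect_host_py (hostname : String) (out : Bool) : Prop := out = is_valid_redirect_host_py_alt hostname
instance (hostname : String) (out : Bool) : Decidable (Spec_is_valid_redirect_host_py hostname out) := by unfold Spec_is_valid_redirect_host_py; infer_instance

-- ===== CLAIM (what is proved, stated in full; the proofs are below) =====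
def Claim_equal_is_valid_redirect_host_py : Prop := ∀ (hostname : String), Dom_is_valid_redirect_host_py hostname → Spec_is_valid_redirect_host_py hostname (is_valid_redirect_host_py hostname)

-- ===== LEMMAS AND PROOFS =====

set_option maxHeartbeats 800000

-- a two-state scanner for "label ('.' label)*" with labels nonempty and alnum/hyphen;
-- state true = inside/after a label char, state false = at a (required) label start
def pvDfa (s : Bool) : List Char → Bool
  | [] => s
  | c :: cs => if c = '.' then s && pvDfa false cs
               else (PySem.Chars.isalnum c || c == '-') && pvDfa true cs

-- like `List.all pvLabelOk` but the FIRST label is allowed to be judged as a label tail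
def pvAllOkT : List (List Char) → Bool
  | [] => true
  | h :: t => h.all (fun c => PySem.Chars.isalnum c || c == '-') && t.all pvLabelOk

theorem pvSplit_all (cs : List Char) :
    ((cs.splitOn '.').all pvLabelOk = pvDfa false cs) ∧
    (pvAllOkT (cs.splitOn '.') = pvDfa true cs) := by
  induction cs with
  | nil => simp [List.splitOn, pvAllOkT, pvDfa, pvLabelOk]
  | cons c cs ih =>
    obtain ⟨h1, h2⟩ := ih
    simp only [List.splitOn] at *
    rcases hps : List.splitOnP (· == '.') cs with _ | ⟨h, t⟩
    · exact absurd hps (List.splitOnP_ne_nil _ cs)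
    · rw [hps] at h1 h2
      by_cases hc : c = '.'
      · subst hc
        simp [List.splitOnP_cons, hps, pvDfa, pvAllOkT, pvLabelOk, h1]
      · refine ⟨?_, ?_⟩ <;>
        · rw [List.splitOnP_cons]
          simp only [beq_iff_eq, hc, if_false, hps, List.modifyHead_cons]
          simp [pvDfa, hc, pvLabelOk, pvAllOkT, ← h2, Bool.and_assoc]

theorem pvSplit_len (cs : List Char) :
    (2 ≤ (cs.splitOn '.').length) ↔ '.' ∈ cs := by
  induction cs with
  | nil => simp [List.splitOn]
  | cons c cs ih =>
    simp only [List.splitOn] at *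
    by_cases hc : c = '.'
    · subst hc
      have h1 : 0 < (List.splitOnP (fun x => x == '.') cs).length :=
        List.length_pos_of_ne_nil (List.splitOnP_ne_nil _ cs)
      simp [List.splitOnP_cons]
      omega
    · simp only [List.splitOnP_cons, beq_iff_eq, hc, if_false, List.length_modifyHead,
        List.mem_cons]
      rw [ih]
      constructor
      · exact Or.inr
      · rintro (h | h)
        · exact absurd h.symm hc
        · exact h

theorem pvDfa_char (cs : List Char) :
    (pvDfa true cs = true ↔
      ((∀ c ∈ cs, pvAllowedA c = true) ∧ ¬ (['.', '.'] <:+: cs) ∧ cs.getLast? ≠ some '.')) ∧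
    (pvDfa false cs = true ↔
      (cs ≠ [] ∧ cs.head? ≠ some '.' ∧ (∀ c ∈ cs, pvAllowedA c = true) ∧
        ¬ (['.', '.'] <:+: cs) ∧ cs.getLast? ≠ some '.')) := by
  induction cs with
  | nil => simp [pvDfa]
  | cons c cs ih =>
    obtain ⟨h1, h2⟩ := ih
    have hinf : (['.', '.'] <:+: c :: cs) ↔ ((c = '.' ∧ cs.head? = some '.') ∨ ['.', '.'] <:+: cs) := by
      rw [List.infix_cons_iff]
      constructor
      · rintro (hp | hi)
        · rcases cs with _ | ⟨d, cs⟩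
          · simp at hp
          · simp [List.prefix_cons_iff] at hp ⊢
            tauto
        · exact Or.inr hi
      · rintro (⟨rfl, hh⟩ | hi)
        · rcases cs with _ | ⟨d, cs⟩ <;> simp_all
        · exact Or.inr hi
    by_cases hc : c = '.'
    · subst hc
      refine ⟨?_, by simp [pvDfa]⟩
      have hd1 : pvDfa true ('.' :: cs) = pvDfa false cs := by simp [pvDfa]
      rw [hd1, h2]
      have hdot : pvAllowedA '.' = true := by decide
      constructor
      · rintro ⟨hne, hh, hall, hi, hl⟩
        refine ⟨?_, ?_, ?_⟩
        · intro c hc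
          rcases List.mem_cons.mp hc with rfl | hc
          · exact hdot
          · exact hall c hc
        · rw [hinf]
          rintro (⟨-, hh'⟩ | hi')
          · exact hh hh'
          · exact hi hi'
        · rcases cs with _ | ⟨d, cs⟩
          · exact absurd rfl hne
          · simpa using hl
      · rintro ⟨hall, hi, hl⟩
        have hne : cs ≠ [] := by rintro rfl; simp at hl
        refine ⟨hne, ?_, fun c hc => hall c (List.mem_cons_of_mem _ hc), ?_, ?_⟩
        · intro hh; exact hi (hinf.mpr (Or.inl ⟨rfl, hh⟩))
        · intro hi'; exact hi (hinf.mpr (Or.inr hi'))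
        · rcases cs with _ | ⟨d, cs⟩
          · exact absurd rfl hne
          · simpa using hl
    · have hdfa : ∀ s, pvDfa s (c :: cs) = ((PySem.Chars.isalnum c || c == '-') && pvDfa true cs) := by
        intro s; simp [pvDfa, hc]
      have hal : ((PySem.Chars.isalnum c || c == '-') = true) ↔ pvAllowedA c = true := by
        simp [pvAllowedA, PySem.Chars.isalnum, PySem.Chars.isalpha, PySem.Chars.isdigit,
          PySem.Chars.isupper, PySem.Chars.islower, hc]
        tauto
      constructor <;> rw [hdfa] <;>
      · simp only [Bool.and_eq_true, h1, hal]
        rcases cs with _ | ⟨d, cs⟩ <;> simp [hinf, hc] <;> tauto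

theorem pvIPv4_ok (cs : List Char) (h : pvIsIPv4 cs = true) :
    (decide (2 ≤ (cs.splitOn '.').length) && (cs.splitOn '.').all pvLabelOk) = true := by
  simp only [pvIsIPv4, Bool.and_eq_true, beq_iff_eq, List.all_eq_true] at h
  obtain ⟨hlen, hall⟩ := h
  simp only [Bool.and_eq_true, decide_eq_true_eq, List.all_eq_true]
  refine ⟨by omega, fun l hl => ?_⟩
  have := hall l hl
  simp only [pvParseOctet, Bool.and_eq_true, List.all_eq_true] at this
  obtain ⟨⟨⟨⟨hne, hdig⟩, _⟩, _⟩, _⟩ := this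
  simp only [pvLabelOk, Bool.and_eq_true, List.all_eq_true, hne, true_and]
  intro c hcl
  have := hdig c hcl
  simp [PySem.Chars.isalnum, PySem.Chars.isalpha, this]

theorem pvSingleton_prefix (l : List Char) (a : Char) : ([a] <+: l) ↔ l.head? = some a := by
  rcases l with _ | ⟨b, l⟩
  · simp
  · simp [List.prefix_cons_iff, eq_comm]

theorem pvSingleton_suffix (l : List Char) (a : Char) : ([a] <:+ l) ↔ l.getLast? = some a := by
  constructor
  · rintro ⟨t, rfl⟩
    simp
  · intro h
    rcases l.eq_nil_or_concat with rfl | ⟨t, b, rfl⟩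
    · simp at h
    · have hb : b = a := by simpa using h
      exact ⟨t, by simp [List.concat_eq_append, hb]⟩

theorem pvStartswith_eq (cs : List Char) :
    PySem.Chars.startswith cs ['.'] = decide (cs.head? = some '.') := by
  rw [Bool.eq_iff_iff]
  simp [PySem.Chars.startswith, List.isPrefixOf_iff_prefix, pvSingleton_prefix]

theorem pvEndswith_eq (cs : List Char) :
    PySem.Chars.endswith cs ['.'] = decide (cs.getLast? = some '.') := by
  rw [Bool.eq_iff_iff]
  simp [PySem.Chars.endswith, List.isSuffixOf_iff_suffix, pvSingleton_suffix]

theorem pvIsInDD_eq (cs : List Char) :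
    PySem.Chars.isIn ['.', '.'] cs = decide (['.', '.'] <:+: cs) := by
  rw [Bool.eq_iff_iff]
  simp [PySem.Chars.isIn_iff_infix]

-- ===== VERDICT (by name: the statement is the Claim_ definition above) =====
theorem is_valid_redirect_host_py_spec : Claim_equal_is_valid_redirect_host_py := by
  intro hostname _
  unfold Spec_is_valid_redirect_host_py is_valid_redirect_host_py is_valid_redirect_host_py_alt
  set cs := PySem.Chars.strip hostname.toList with hcs
  by_cases he : cs.isEmpty
  · simp [he]
  · simp only [he, Bool.false_eq_true, if_false]
    by_cases hloc : PySem.Chars.lower cs = "localhost".toList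
    · simp [hloc]
    · have hlocb : (PySem.Chars.lower cs == "localhost".toList) = false := by
        simpa using hloc
      simp only [hlocb, if_false, Bool.false_eq_true]
      by_cases hip : pvIsIPv4 cs = true
      · simpa [hip] using (pvIPv4_ok cs hip).symm
      · simp only [hip, if_false, Bool.false_eq_true]
        have hB : (decide (2 ≤ (cs.splitOn '.').length) && (cs.splitOn '.').all pvLabelOk)
            = (decide ('.' ∈ cs) && pvDfa false cs) := by
          rw [(pvSplit_all cs).1]
          congr 1
          simp [pvSplit_len cs]
        rw [hB]
        have hne : cs ≠ [] := by simpa [List.isEmpty_iff] using he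
        by_cases hd : '.' ∈ cs
        · have hin : PySem.Chars.isIn ['.'] cs = true := by
            rw [PySem.Chars.isIn_iff_infix, List.singleton_infix_iff]; exact hd
          by_cases hbad : (cs.any fun ch => !pvAllowedA ch) = true
          · have hF : pvDfa false cs = false := by
              cases hF' : pvDfa false cs
              · rfl
              · obtain ⟨-, -, hall, -, -⟩ := (pvDfa_char cs).2.mp hF'
                obtain ⟨x, hx, hfx⟩ := List.any_eq_true.mp hbad
                exact absurd (hall x hx) (by simpa using hfx)
            simp [hin, hbad, hF]
          · have hbadf : (cs.any fun ch => !pvAllowedA ch) = false :=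
              Bool.eq_false_iff.mpr hbad
            have hallA : ∀ c ∈ cs, pvAllowedA c = true := by
              intro c hc
              by_contra hcc
              exact hbad (List.any_eq_true.mpr ⟨c, hc, by simpa using hcc⟩)
            simp only [hin, Bool.not_true, Bool.false_eq_true, if_false, hbadf]
            rw [pvStartswith_eq, pvEndswith_eq, pvIsInDD_eq, Bool.eq_iff_iff]
            simp only [Bool.and_eq_true, Bool.not_eq_true', decide_eq_false_iff_not,
              decide_eq_true_eq, (pvDfa_char cs).2]
            constructor
            · rintro ⟨⟨hsw, hew⟩, hdd⟩
              exact ⟨hd, hne, hsw, hallA, hdd, hew⟩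
            · rintro ⟨-, -, hsw, -, hdd, hew⟩
              exact ⟨⟨hsw, hew⟩, hdd⟩
        · have hin : PySem.Chars.isIn ['.'] cs = false := by
            rw [PySem.Chars.isIn_eq_false_iff]
            simpa [List.singleton_infix_iff] using hd
          simp [hin, hd]
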